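-- pv_equiv track=rewrite | github.com/99lalo/Python-Loops-n-Arrays-Practice | exercises/15.2-Parking_lot_check/app.py | get_parking_lot
-- ===== SOURCE A (Python) =====
-- def get_parking_lot(lot):
--     state = {"totalSlots": 0, "availableSlots": 0, "occupiedSlots": 0}
--     for i in lot:
--         for x in i:
--             if x == 1:
--                 state["occupiedSlots"] += 1
--                 state["totalSlots"] += 1
--             elif x == 2:
--                 state["availableSlots"] += 1
--                 state["totalSlots"] += 1
--     return state
-- ===== SOURCE B (Python) =====
-- def get_parking_lot(lot):
--     occupied = sum(row.count(1) for row in lot)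
--     available = sum(row.count(2) for row in lot)
--     return {"totalSlots": occupied + available,
--             "availableSlots": available,
--             "occupiedSlots": occupied}
-- ===== Notes on version B (the rewrite author's own statement) =====
-- stated objective: idiomatic
-- what changed: Replaces the nested loop with conditional dict accumulation by per-row list.count frequency lookups summed over rows, with total computed as occupied+available instead of incrementally.
import Mathlib
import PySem

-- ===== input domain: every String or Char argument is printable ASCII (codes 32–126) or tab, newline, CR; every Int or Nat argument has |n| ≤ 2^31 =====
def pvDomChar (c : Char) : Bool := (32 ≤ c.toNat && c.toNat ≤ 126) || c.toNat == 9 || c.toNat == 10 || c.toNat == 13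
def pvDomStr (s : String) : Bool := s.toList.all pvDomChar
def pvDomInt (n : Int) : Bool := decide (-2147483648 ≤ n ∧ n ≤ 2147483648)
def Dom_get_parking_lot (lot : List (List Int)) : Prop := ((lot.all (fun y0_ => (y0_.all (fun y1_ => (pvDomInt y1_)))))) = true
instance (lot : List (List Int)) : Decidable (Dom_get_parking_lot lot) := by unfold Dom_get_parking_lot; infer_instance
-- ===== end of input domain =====

-- B replaces A's conditional dict accumulation by per-row count lookups (idiomatic); same O(n) cost.

-- ===== PORT A =====
-- the body of A's inner loop, named so the proofs can cite it
def pvStepA (st : PySem.Dict String Int) (x : Int) : PySem.Dict String Int :=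
  if x = 1 then
    let st := st.modify "occupiedSlots" 0 (· + 1)
    st.modify "totalSlots" 0 (· + 1)
  else if x = 2 then
    let st := st.modify "availableSlots" 0 (· + 1)
    st.modify "totalSlots" 0 (· + 1)
  else st

def get_parking_lot (lot : List (List Int)) : List (String × Int) :=
  let state : PySem.Dict String Int :=
    PySem.Dict.ofList [("totalSlots", 0), ("availableSlots", 0), ("occupiedSlots", 0)]
  let state := lot.foldl (fun st i => i.foldl pvStepA st) state
  state.items

-- ===== PORT B =====
def get_parking_lot_alt (lot : List (List Int)) : List (String × Int) :=
  let occupied : Int := ((lot.map (fun row => PySem.List.count row 1)).sum : Nat)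
  let available : Int := ((lot.map (fun row => PySem.List.count row 2)).sum : Nat)
  [("totalSlots", occupied + available),
   ("availableSlots", available),
   ("occupiedSlots", occupied)]

-- ===== PRECONDITION & SPEC =====
def Spec_get_parking_lot (lot : List (List Int)) (out : List (String × Int)) : Prop := out = get_parking_lot_alt lot
instance (lot : List (List Int)) (out : List (String × Int)) : Decidable (Spec_get_parking_lot lot out) := by unfold Spec_get_parking_lot; infer_instance

-- ===== CLAIM (what is proved, stated in full; the proofs are below) =====
def Claim_equal_get_parking_lot : Prop := ∀ (lot : List (List Int)), Dom_get_parking_lot lot → Spec_get_parking_lot lot (get_parking_lot lot)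

-- ===== LEMMAS AND PROOFS =====

theorem pvStepA_one (T A O : Int) :
    pvStepA (PySem.Dict.mk [("totalSlots", T), ("availableSlots", A), ("occupiedSlots", O)]) 1
    = PySem.Dict.mk [("totalSlots", T + 1), ("availableSlots", A), ("occupiedSlots", O + 1)] := by
  simp [pvStepA, PySem.Dict.modify, PySem.Dict.insert, PySem.Dict.getD, PySem.Dict.get?]

theorem pvStepA_two (T A O : Int) :
    pvStepA (PySem.Dict.mk [("totalSlots", T), ("availableSlots", A), ("occupiedSlots", O)]) 2
    = PySem.Dict.mk [("totalSlots", T + 1), ("availableSlots", A + 1), ("occupiedSlots", O)] := by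
  simp [pvStepA, PySem.Dict.modify, PySem.Dict.insert, PySem.Dict.getD, PySem.Dict.get?]

theorem pvStepA_other (T A O : Int) (x : Int) (h1 : x ≠ 1) (h2 : x ≠ 2) :
    pvStepA (PySem.Dict.mk [("totalSlots", T), ("availableSlots", A), ("occupiedSlots", O)]) x
    = PySem.Dict.mk [("totalSlots", T), ("availableSlots", A), ("occupiedSlots", O)] := by
  simp [pvStepA, h1, h2]

theorem row_step (row : List Int) (T A O : Int) :
    row.foldl pvStepA
      (PySem.Dict.mk [("totalSlots", T), ("availableSlots", A), ("occupiedSlots", O)])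
    = PySem.Dict.mk [("totalSlots", T + row.count 1 + row.count 2),
                     ("availableSlots", A + row.count 2),
                     ("occupiedSlots", O + row.count 1)] := by
  induction row generalizing T A O with
  | nil => simp
  | cons x xs ih =>
    by_cases h1 : x = 1
    · subst h1
      rw [List.foldl_cons, pvStepA_one, ih]
      simp
      constructor <;> ring
    · by_cases h2 : x = 2
      · subst h2
        rw [List.foldl_cons, pvStepA_two, ih]
        simp
        constructor <;> ring
      · rw [List.foldl_cons, pvStepA_other T A O x h1 h2, ih]
        simp [h1, h2]

theorem lot_fold (lot : List (List Int)) (T A O : Int) :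
    lot.foldl (fun st i => i.foldl pvStepA st)
      (PySem.Dict.mk [("totalSlots", T), ("availableSlots", A), ("occupiedSlots", O)])
    = PySem.Dict.mk
        [("totalSlots", T + (lot.map (fun row => (row.count 1 : Int))).sum + (lot.map (fun row => (row.count 2 : Int))).sum),
         ("availableSlots", A + (lot.map (fun row => (row.count 2 : Int))).sum),
         ("occupiedSlots", O + (lot.map (fun row => (row.count 1 : Int))).sum)] := by
  induction lot generalizing T A O with
  | nil => simp
  | cons r rs ih =>
    rw [List.foldl_cons]
    show (rs.foldl (fun st i => i.foldl pvStepA st) (r.foldl pvStepA _)) = _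
    rw [row_step, ih]
    simp only [List.map_cons, List.sum_cons, PySem.Dict.mk.injEq, List.cons.injEq,
      Prod.mk.injEq, true_and, and_true]
    and_intros <;> ring

-- ===== VERDICT (by name: the statement is the Claim_ definition above) =====
theorem get_parking_lot_spec : Claim_equal_get_parking_lot := by
  intro lot _
  unfold Spec_get_parking_lot get_parking_lot get_parking_lot_alt
  have hinit : (PySem.Dict.ofList [("totalSlots", (0:Int)), ("availableSlots", 0), ("occupiedSlots", 0)])
      = PySem.Dict.mk [("totalSlots", 0), ("availableSlots", 0), ("occupiedSlots", 0)] := by decide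
  simp only [hinit, lot_fold]
  simp [PySem.List.count_eq]
  and_intros <;> simp [Function.comp_def]
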